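-- pv_equiv track=rewrite | github.com/HTFDT/Python-Skillbox | buns/mod2/task11.py | check_for_reps
-- ===== SOURCE A (Python) =====
-- def check_for_reps(s):
--     for i in range(0, len(s), 2):
--         for j in range(0, len(s), 2):
--             if i == j:
--                 continue
--             if s[i] == s[j]:
--                 return True
--     return False
-- ===== SOURCE B (Python) =====
-- def check_for_reps(s):
--     sevens = sorted(s[::2])
--     for i in range(len(sevens) - 1):
--         if sevens[i] == sevens[i + 1]:
--             return True
--     return False
-- ===== Notes on version B (the rewrite author's own statement) =====
-- stated objective: faster
-- what changed: Replaces A's quadratic nested scan comparing every pair of even-indexed elements by slicing out s[::2] once, sorting it, and scanning adjacent pairs for an equal neighbour.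
import Mathlib
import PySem

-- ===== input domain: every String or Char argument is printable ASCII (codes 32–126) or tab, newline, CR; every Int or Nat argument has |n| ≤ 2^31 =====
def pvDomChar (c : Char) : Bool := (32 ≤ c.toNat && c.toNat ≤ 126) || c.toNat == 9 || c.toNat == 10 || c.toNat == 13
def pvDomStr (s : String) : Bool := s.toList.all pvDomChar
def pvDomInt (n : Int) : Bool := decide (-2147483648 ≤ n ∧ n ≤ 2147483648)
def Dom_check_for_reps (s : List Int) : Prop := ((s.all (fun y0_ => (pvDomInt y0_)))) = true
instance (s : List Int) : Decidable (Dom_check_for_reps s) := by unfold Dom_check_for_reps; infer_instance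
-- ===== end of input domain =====

-- B replaces A's quadratic nested scan over even indices by sort-then-adjacent-scan on s[::2]; objective: faster.

-- ===== PORT A =====
def check_for_reps (s : List Int) : Bool :=
  (PySem.List.pyRange 0 (s.length : Int) 2).any (fun i =>
    (PySem.List.pyRange 0 (s.length : Int) 2).any (fun j =>
      if i == j then false
      else PySem.List.pyGetD s i 0 == PySem.List.pyGetD s j 0))

-- ===== PORT B =====
-- s[::2] (PySem.List.slice has no step parameter; this is the exact step-2-from-0 slice)
def everyOther : List Int → List Int
  | [] => []
  | [x] => [x]
  | x :: _ :: t => x :: everyOther t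

def check_for_reps_alt (s : List Int) : Bool :=
  let sevens := PySem.List.sorted (everyOther s) (fun x => x) false
  (PySem.List.pyRange 0 ((sevens.length : Int) - 1) 1).any (fun i =>
    PySem.List.pyGetD sevens i 0 == PySem.List.pyGetD sevens (i + 1) 0)

-- ===== PRECONDITION & SPEC =====
def Spec_check_for_reps (s : List Int) (out : Bool) : Prop := out = check_for_reps_alt s
instance (s : List Int) (out : Bool) : Decidable (Spec_check_for_reps s out) := by unfold Spec_check_for_reps; infer_instance

-- ===== CLAIM (what is proved, stated in full; the proofs are below) =====
def Claim_equal_check_for_reps : Prop := ∀ (s : List Int), Dom_check_for_reps s → Spec_check_for_reps s (check_for_reps s)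

-- ===== LEMMAS AND PROOFS =====

lemma everyOther_getD : ∀ (s : List Int) (k : Nat), (everyOther s).getD k 0 = s.getD (2 * k) 0
  | [], k => by cases k <;> simp [everyOther]
  | [x], k => by cases k <;> simp [everyOther, List.getD]
  | x :: y :: t, 0 => by simp [everyOther]
  | x :: y :: t, (k + 1) => by
      have := everyOther_getD t k
      simpa [everyOther, List.getD, Nat.mul_add] using this

lemma everyOther_length : ∀ (s : List Int), (everyOther s).length = (s.length + 1) / 2
  | [] => rfl
  | [x] => by simp [everyOther]
  | x :: y :: t => by
      have := everyOther_length t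
      simp [everyOther, this]
      omega

lemma not_nodup_iff_pair (l : List Int) :
    ¬ l.Nodup ↔ ∃ i j, ∃ (_hi : i < l.length) (_hj : j < l.length), i ≠ j ∧ l[i] = l[j] := by
  rw [List.nodup_iff_injective_get]
  constructor
  · intro h
    simp [Function.Injective] at h
    obtain ⟨⟨i, hi⟩, ⟨j, hj⟩, heq, hne⟩ := h
    exact ⟨i, j, hi, hj, by simpa using hne, by simpa using heq⟩
  · rintro ⟨i, j, hi, hj, hne, heq⟩ h
    exact hne (by simpa using congrArg Fin.val (h (a₁ := ⟨i, hi⟩) (a₂ := ⟨j, hj⟩) (by simpa using heq)))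

lemma A_iff (s : List Int) :
    check_for_reps s = true ↔ ¬ (everyOther s).Nodup := by
  have hm : (everyOther s).length = (s.length + 1) / 2 := everyOther_length s
  have hcnt : PySem.List.pyRange 0 (s.length : Int) 2
      = (List.range ((s.length + 1) / 2)).map (fun k : Nat => (0 : Int) + 2 * (k : Int)) := by
    rw [PySem.List.pyRange_of_pos 0 (s.length : Int) (by norm_num)]
    have : (if (0 : Int) < (s.length : Int) then (((s.length : Int) - 0 + 2 - 1) / 2).toNat else 0)
        = (s.length + 1) / 2 := by
      split_ifs with h <;> omega
    rw [this]
  unfold check_for_reps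
  rw [hcnt]
  simp only [List.any_map, List.any_eq_true, List.mem_range, Function.comp_apply,
    beq_iff_eq, zero_add]
  rw [not_nodup_iff_pair]
  have hget : ∀ a : Nat, PySem.List.pyGetD s (2 * (a : Int)) 0 = (everyOther s).getD a 0 := by
    intro a
    have h2 : (2 * (a : Int)) = ((2 * a : Nat) : Int) := by push_cast; ring
    rw [h2, PySem.List.pyGetD_natCast, ← everyOther_getD]
  constructor
  · rintro ⟨a, ha, b, hb, hif⟩
    by_cases hab : (2 * (a : Int)) = 2 * (b : Int)
    · simp [hab] at hif
    · rw [if_neg hab, beq_iff_eq, hget, hget] at hif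
      have hne : a ≠ b := by intro h; subst h; simp at hab
      have ha' : a < (everyOther s).length := by omega
      have hb' : b < (everyOther s).length := by omega
      refine ⟨a, b, ha', hb', hne, ?_⟩
      rw [← List.getD_eq_getElem _ 0 ha', ← List.getD_eq_getElem _ 0 hb', hif]
  · rintro ⟨a, b, ha', hb', hne, heq⟩
    have ha : a < (s.length + 1) / 2 := by omega
    have hb : b < (s.length + 1) / 2 := by omega
    refine ⟨a, ha, b, hb, ?_⟩
    have hab : ¬ ((2 * (a : Int)) = 2 * (b : Int)) := by
      intro h
      exact hne (by exact_mod_cast (by omega : (a : Int) = b))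
    rw [if_neg hab, beq_iff_eq, hget, hget,
      List.getD_eq_getElem _ 0 ha', List.getD_eq_getElem _ 0 hb', heq]

lemma B_iff (s : List Int) :
    check_for_reps_alt s = true ↔ ¬ (everyOther s).Nodup := by
  have hperm : (PySem.List.sorted (everyOther s) (fun x => x) false).Perm (everyOther s) :=
    PySem.List.sorted_perm _ _ _
  have hle : (PySem.List.sorted (everyOther s) (fun x => x) false).Pairwise (· ≤ ·) :=
    PySem.List.sorted_pairwise (everyOther s) (fun x => x)
  rw [← hperm.nodup_iff]
  set sv := PySem.List.sorted (everyOther s) (fun x => x) false with hsv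
  have hrange : PySem.List.pyRange 0 ((sv.length : Int) - 1) 1
      = (List.range (sv.length - 1)).map (fun k : Nat => (0 : Int) + (k : Int)) := by
    rw [PySem.List.pyRange_one]
    congr 2
    omega
  show ((PySem.List.pyRange 0 ((sv.length : Int) - 1) 1).any (fun i =>
    PySem.List.pyGetD sv i 0 == PySem.List.pyGetD sv (i + 1) 0)) = true ↔ ¬ sv.Nodup
  rw [hrange]
  simp only [List.any_map, List.any_eq_true, List.mem_range, Function.comp_apply,
    beq_iff_eq, zero_add]
  have hget : ∀ k : Nat, PySem.List.pyGetD sv (k : Int) 0 = sv.getD k 0 := by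
    intro k; rw [PySem.List.pyGetD_natCast]
  have hget1 : ∀ k : Nat, PySem.List.pyGetD sv ((k : Int) + 1) 0 = sv.getD (k + 1) 0 := by
    intro k
    have : ((k : Int) + 1) = (((k + 1 : Nat)) : Int) := by push_cast; ring
    rw [this, PySem.List.pyGetD_natCast]
  have hnodup : sv.Nodup ↔ sv.Pairwise (· < ·) := by
    constructor
    · intro h
      exact (hle.and h).imp (fun hx => lt_of_le_of_ne hx.1 hx.2)
    · intro h
      exact h.imp ne_of_lt
  have hchain : sv.Pairwise (· < ·) ↔ ∀ (i : Nat) (_hi : i + 1 < sv.length), sv[i] < sv[i+1] := by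
    rw [← List.isChain_iff_pairwise, List.isChain_iff_getElem]
  constructor
  · rintro ⟨k, hk, heq⟩
    have hk1 : k + 1 < sv.length := by omega
    have hk0 : k < sv.length := by omega
    rw [hnodup, hchain]
    intro hall
    have hlt := hall k hk1
    rw [hget, hget1, List.getD_eq_getElem _ 0 hk0, List.getD_eq_getElem _ 0 hk1] at heq
    omega
  · intro hnd
    rw [hnodup, hchain] at hnd
    push Not at hnd
    obtain ⟨k, hk1, hlt⟩ := hnd
    have hk0 : k < sv.length := by omega
    have hadj : sv[k] ≤ sv[k+1] := by
      exact PySem.List.sorted_id_getElem_mono (everyOther s) (by omega) (by omega)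
    have heq : sv[k] = sv[k+1] := le_antisymm hadj (by omega)
    refine ⟨k, by omega, ?_⟩
    rw [hget, hget1, List.getD_eq_getElem _ 0 hk0, List.getD_eq_getElem _ 0 hk1, heq]

-- ===== VERDICT (by name: the statement is the Claim_ definition above) =====
theorem check_for_reps_spec : Claim_equal_check_for_reps := by
  intro s _
  unfold Spec_check_for_reps
  have := (A_iff s).trans (B_iff s).symm
  cases hA : check_for_reps s <;> cases hB : check_for_reps_alt s <;> simp_all
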